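-- pv_equiv track=rewrite | github.com/labgem/netsyn | netsyn2/DataExport.py | get_sorted_nr_data
-- ===== SOURCE A (Python) =====
-- def get_sorted_nr_data(specific_list, counter=False):
--     if counter:
--         lower_case_list = [name.lower() for name in specific_list]
--         convert_to_dict = {name: lower_case_list.count(name) for name in set(lower_case_list)}
--         if 'na' in convert_to_dict.keys() and len(convert_to_dict) == 1:
--             sorted_nr_list = ['NA']
--         else:
--             if 'na' in convert_to_dict.keys():
--                 del convert_to_dict['na']
--             sorted_keys_list = sorted(convert_to_dict.keys(), key=lambda x: x.lower())
--             sorted_nr_list = ['{} [{}]'.format(name, convert_to_dict[name]) for name in sorted_keys_list]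
--     else:
--         sorted_nr_list = sorted(set([name for name in specific_list if name != 'NA']), key=lambda x: x.lower())#, key=lambda x: familyContent['gene_names'].index(x))
--     string = ' / '.join(sorted_nr_list)
--     return string
-- ===== SOURCE B (Python) =====
-- def get_sorted_nr_data(specific_list, counter=False):
--     if counter:
--         lowered = sorted(name.lower() for name in specific_list)
--         groups = []
--         i = 0
--         while i < len(lowered):
--             j = i
--             while j < len(lowered) and lowered[j] == lowered[i]:
--                 j += 1
--             groups.append((lowered[i], j - i))
--             i = j
--         if len(groups) == 1 and groups[0][0] == 'na':
--             return 'NA'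
--         return ' / '.join('{} [{}]'.format(n, c) for n, c in groups if n != 'na')
--     pairs = sorted({(name.lower(), name) for name in specific_list if name != 'NA'})
--     return ' / '.join(name for _, name in pairs)
-- ===== Notes on version B (the rewrite author's own statement) =====
-- stated objective: alternative
-- what changed: Replaces the hash-count dict built with repeated list.count plus a re-sort of its keys by a single sort of the lowercased names followed by one run-length grouping pass; the counter=False branch sorts deduplicated (lower, name) pairs instead of a stably key-sorted set.
-- outside the precondition, e.g. on get_sorted_nr_data(['A', 'a'], False): A returns 'a / A', B returns 'A / a'
import Mathlib
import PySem

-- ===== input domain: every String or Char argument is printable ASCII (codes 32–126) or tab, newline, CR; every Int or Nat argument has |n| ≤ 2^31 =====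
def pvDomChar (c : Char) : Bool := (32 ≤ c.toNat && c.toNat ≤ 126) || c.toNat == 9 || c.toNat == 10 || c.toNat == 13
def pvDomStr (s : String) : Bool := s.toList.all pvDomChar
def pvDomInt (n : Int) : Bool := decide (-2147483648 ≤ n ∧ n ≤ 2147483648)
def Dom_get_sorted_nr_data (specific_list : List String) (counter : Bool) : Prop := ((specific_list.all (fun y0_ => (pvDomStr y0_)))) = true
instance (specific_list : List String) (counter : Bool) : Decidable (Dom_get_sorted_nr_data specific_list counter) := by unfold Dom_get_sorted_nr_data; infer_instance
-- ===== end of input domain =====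

-- One honest line: B replaces A's count-dict-then-key-sort with one sort of the lowercased
-- names followed by a single run-length grouping pass (counter=True), and sorts deduplicated
-- (lower, name) pairs instead of a stably key-sorted set (counter=False); same cost class.

-- ===== PORT A =====
def get_sorted_nr_data (specific_list : List String) (counter : Bool) : String :=
  let sorted_nr_list : List String :=
    if counter then
      let lower_case_list := specific_list.map (fun name => PySem.Str.lower name)
      let convert_to_dict : PySem.Dict String Int :=
        (PySem.Set.ofList lower_case_list).foldl
          (fun d name => d.insert name ((lower_case_list.count name : Int))) PySem.Dict.empty
      if convert_to_dict.contains "na" && convert_to_dict.size == 1 then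
        ["NA"]
      else
        let convert_to_dict2 :=
          if convert_to_dict.contains "na" then convert_to_dict.erase "na" else convert_to_dict
        let sorted_keys_list := PySem.List.sorted convert_to_dict2.keys (fun x => PySem.Str.lower x)
        sorted_keys_list.map (fun name =>
          name ++ " [" ++ PySem.Int.toStr (convert_to_dict2.getD name 0) ++ "]")
    else
      PySem.List.sorted (PySem.Set.ofList (specific_list.filter (fun name => name != "NA")))
        (fun x => PySem.Str.lower x)
  PySem.Str.join " / " sorted_nr_list

-- ===== PORT B =====
-- the two nested while loops of Source B: one run-length grouping pass over the sorted list
def pvGroup (ys : List String) : List (String × Int) :=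
  match ys with
  | [] => []
  | x :: xs =>
      (x, ((xs.takeWhile (fun y => y == x)).length : Int) + 1) ::
        pvGroup (xs.dropWhile (fun y => y == x))
termination_by ys.length
decreasing_by
  simpa using Nat.lt_succ_of_le (List.length_dropWhile_le _ _)

def get_sorted_nr_data_alt (specific_list : List String) (counter : Bool) : String :=
  if counter then
    let lowered := PySem.List.sorted (specific_list.map (fun name => PySem.Str.lower name)) (fun x => x)
    let groups := pvGroup lowered
    if groups.length == 1 && (groups.headD ("", 0)).1 == "na" then "NA"
    else
      PySem.Str.join " / "
        ((groups.filter (fun g => g.1 != "na")).map (fun g =>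
          g.1 ++ " [" ++ PySem.Int.toStr g.2 ++ "]"))
  else
    let pairs := PySem.List.sorted2
      (PySem.Set.ofList ((specific_list.filter (fun name => name != "NA")).map
        (fun name => (PySem.Str.lower name, name))))
      (fun p => p.1) (fun p => p.2)
    PySem.Str.join " / " (pairs.map (fun p => p.2))

-- ===== PRECONDITION & SPEC =====
-- Pre_ excludes (only in the counter=False branch) lists holding two DISTINCT non-'NA' names
-- with the same lowercase form: there A's output order among them is the accidental,
-- hash-seed-dependent iteration order of set() under a stable key sort, which no port can fix.
def Pre_get_sorted_nr_data (specific_list : List String) (counter : Bool) : Prop :=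
  counter = true ∨
    ∀ x ∈ specific_list, ∀ y ∈ specific_list, x ≠ "NA" → y ≠ "NA" →
      PySem.Str.lower x = PySem.Str.lower y → x = y
instance (specific_list : List String) (counter : Bool) : Decidable (Pre_get_sorted_nr_data specific_list counter) := by unfold Pre_get_sorted_nr_data; infer_instance

def pvWitness_get_sorted_nr_data : List String × Bool := (["betA", "NA", "alphaQ"], false)

def Spec_get_sorted_nr_data (specific_list : List String) (counter : Bool) (out : String) : Prop := out = get_sorted_nr_data_alt specific_list counter
instance (specific_list : List String) (counter : Bool) (out : String) : Decidable (Spec_get_sorted_nr_data specific_list counter out) := by unfold Spec_get_sorted_nr_data; infer_instance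

-- ===== CLAIM (what is proved, stated in full; the proofs are below) =====
def Claim_equal_get_sorted_nr_data : Prop := ∀ (specific_list : List String) (counter : Bool), Dom_get_sorted_nr_data specific_list counter → Pre_get_sorted_nr_data specific_list counter → Spec_get_sorted_nr_data specific_list counter (get_sorted_nr_data specific_list counter)

-- ===== LEMMAS AND PROOFS =====

theorem pv_isupper_iff (c : Char) : PySem.Chars.isupper c = true ↔ 65 ≤ c.toNat ∧ c.toNat ≤ 90 := by
  simp [PySem.Chars.isupper, Char.le_def]
  constructor
  · intro h; exact ⟨by exact_mod_cast h.1, by exact_mod_cast h.2⟩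
  · intro h; exact ⟨by exact_mod_cast h.1, by exact_mod_cast h.2⟩
theorem pv_lowerChar_idem (c : Char) :
    PySem.Chars.lowerChar (PySem.Chars.lowerChar c) = PySem.Chars.lowerChar c := by
  unfold PySem.Chars.lowerChar
  by_cases h : PySem.Chars.isupper c = true
  · rw [if_pos h]
    have hc := (pv_isupper_iff c).1 h
    have hv : (c.toNat + 32).isValidChar := by
      left; omega
    have ht : (Char.ofNat (c.toNat + 32)).toNat = c.toNat + 32 := by
      rw [Char.toNat_ofNat, if_pos hv]
    have : PySem.Chars.isupper (Char.ofNat (c.toNat + 32)) = false := by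
      rw [Bool.eq_false_iff]
      intro hu
      have := (pv_isupper_iff _).1 hu
      omega
    rw [if_neg (by simp [this])]
  · rw [if_neg h, if_neg h]
theorem pv_lower_idem (s : String) :
    PySem.Str.lower (PySem.Str.lower s) = PySem.Str.lower s := by
  unfold PySem.Str.lower
  rw [String.toList_ofList]
  congr 1
  unfold PySem.Chars.lower
  simp [pv_lowerChar_idem, Function.comp]
theorem pv_insertBy_pairwise {α : Type} (before : α → α → Bool)
    (hasym : ∀ a b, before a b = true → before b a = false)
    (htrans : ∀ a b c, before a b = true → before b c = true → before a c = true)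
    (x : α) (l : List α) (h : l.Pairwise (fun a b => before b a = false)) :
    (PySem.List.insertBy before x l).Pairwise (fun a b => before b a = false) := by
  induction l with
  | nil => simp [PySem.List.insertBy]
  | cons y ys ih =>
    rw [show PySem.List.insertBy before x (y :: ys) =
      if before x y then x :: y :: ys else y :: PySem.List.insertBy before x ys from by
        simp [PySem.List.insertBy]]
    rcases List.pairwise_cons.1 h with ⟨hy, hys⟩
    by_cases hxy : before x y = true
    · rw [if_pos hxy]
      refine List.pairwise_cons.2 ⟨?_, h⟩
      intro z hz
      rcases hz with _ | hz
      · exact hasym x y hxy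
      · rename_i hz
        have hzy := hy z hz
        rw [Bool.eq_false_iff]
        intro hzx
        have := htrans z x y hzx hxy
        rw [hzy] at this
        exact Bool.false_ne_true this
    · rw [if_neg hxy]
      refine List.pairwise_cons.2 ⟨?_, ih hys⟩
      intro z hz
      rcases (PySem.List.mem_insertBy before x z ys).1 hz with rfl | hz
      · exact Bool.eq_false_iff.2 hxy
      · exact hy z hz

theorem pv_foldl_insertBy_pairwise {α : Type} (before : α → α → Bool)
    (hasym : ∀ a b, before a b = true → before b a = false)
    (htrans : ∀ a b c, before a b = true → before b c = true → before a c = true)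
    (xs : List α) : ∀ (acc : List α), acc.Pairwise (fun a b => before b a = false) →
    (xs.foldl (fun acc x => PySem.List.insertBy before x acc) acc).Pairwise
      (fun a b => before b a = false) := by
  induction xs with
  | nil => intro acc h; simpa using h
  | cons x xs ih =>
    intro acc h
    exact ih _ (pv_insertBy_pairwise before hasym htrans x acc h)
theorem pv_ofList_map_aux {α β : Type} [BEq α] [LawfulBEq α] [BEq β] [LawfulBEq β]
    (g : α → β) (hg : Function.Injective g) :
    ∀ (xs : List α) (s : List α),
      (xs.map g).foldl PySem.Set.add (s.map g) = (xs.foldl PySem.Set.add s).map g := by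
  intro xs
  induction xs with
  | nil => intro s; simp
  | cons x xs ih =>
    intro s
    have hadd : PySem.Set.add (s.map g) (g x) = (PySem.Set.add s x).map g := by
      unfold PySem.Set.add PySem.Set.contains
      by_cases hx : x ∈ s
      · rw [if_pos (by simp []; exact ⟨x, hx, rfl⟩),
            if_pos (by simp [hx])]
      · rw [if_neg (by simp []; intro a ha hgax; exact hx (hg hgax ▸ ha)),
            if_neg (by simp [hx])]
        simp
    simp only [List.map_cons, List.foldl_cons, hadd]
    exact ih _
theorem pv_ofList_map_inj {α β : Type} [BEq α] [LawfulBEq α] [BEq β] [LawfulBEq β]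
    (g : α → β) (hg : Function.Injective g) (xs : List α) :
    PySem.Set.ofList (xs.map g) = (PySem.Set.ofList xs).map g := by
  unfold PySem.Set.ofList
  have := pv_ofList_map_aux g hg xs []
  simpa [PySem.Set.empty] using this

theorem pv_items_foldl_insert {κ ν : Type} [BEq κ] [LawfulBEq κ] (f : κ → ν) :
    ∀ (ks : List κ) (d : PySem.Dict κ ν), ks.Nodup → (∀ k ∈ ks, d.contains k = false) →
      (ks.foldl (fun d k => d.insert k (f k)) d).items = d.items ++ ks.map (fun k => (k, f k)) := by
  intro ks
  induction ks with
  | nil => intro d _ _; simp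
  | cons k ks ih =>
    intro d hnd hfresh
    have hk : d.contains k = false := hfresh k (by simp)
    have hins : (d.insert k (f k)).items = d.items ++ [(k, f k)] := by
      unfold PySem.Dict.insert
      rw [if_neg (by simp [hk])]
    have hfresh' : ∀ j ∈ ks, (d.insert k (f k)).contains j = false := by
      intro j hj
      have hjk : ¬ (k = j) := by
        intro h; exact (List.nodup_cons.1 hnd).1 (h ▸ hj)
      unfold PySem.Dict.contains
      rw [hins]
      simp only [List.any_append]
      have h1 : d.items.any (fun p => p.1 == j) = false := hfresh j (by simp [hj])
      simp [h1, hjk]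
    rw [List.foldl_cons, ih _ (List.nodup_cons.1 hnd).2 hfresh', hins]
    simp

theorem pv_find?_map_pair {κ ν : Type} [BEq κ] [LawfulBEq κ] (f : κ → ν) :
    ∀ (ks : List κ) (k : κ), k ∈ ks →
      (ks.map (fun j => (j, f j))).find? (fun p => p.1 == k) = some (k, f k) := by
  intro ks
  induction ks with
  | nil => intro k hk; simp at hk
  | cons j ks ih =>
    intro k hk
    by_cases hjk : j = k
    · subst hjk; simp
    · rw [List.map_cons, List.find?_cons_of_neg (by simp [hjk])]
      exact ih k (by rcases List.mem_cons.1 hk with h | h; exact absurd h.symm hjk; exact h)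
theorem pv_pvGroup_spec :
    ∀ ys : List String, ys.Pairwise (· ≤ ·) →
      ((pvGroup ys).map Prod.fst).Pairwise (· < ·) ∧
      (∀ k : String, k ∈ (pvGroup ys).map Prod.fst ↔ k ∈ ys) ∧
      (∀ p ∈ pvGroup ys, p.2 = (ys.count p.1 : Int)) := by
  intro ys
  induction ys using pvGroup.induct with
  | case1 => intro _; simp [pvGroup]
  | case2 x xs ih =>
    intro h
    rcases List.pairwise_cons.1 h with ⟨hxle, hxs⟩
    set r := xs.takeWhile (fun y => y == x) with hr
    set t := xs.dropWhile (fun y => y == x) with ht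
    have hsplit : r ++ t = xs := List.takeWhile_append_dropWhile
    have hrx : ∀ y ∈ r, y = x := by
      intro y hy
      have := List.mem_takeWhile_imp hy
      exact eq_of_beq this
    have htsub : t.Sublist xs := List.dropWhile_sublist _
    have htpw : t.Pairwise (· ≤ ·) := hxs.sublist htsub
    have hxt : x ∉ t := by
      intro hx
      cases hh : t with
      | nil => rw [hh] at hx; simp at hx
      | cons z t' =>
        have pz : (z == x) = false := by
          have := List.head?_dropWhile_not (fun y => y == x) xs
          rw [← ht, hh] at this
          simpa using this
        have hzx : ¬ z = x := by simpa using pz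
        rw [hh] at hx
        rcases List.mem_cons.1 hx with h1 | h1
        · exact hzx h1.symm
        · have hzlex : z ≤ x := by
            rw [hh] at htpw
            exact (List.pairwise_cons.1 htpw).1 x h1
          have hxlez : x ≤ z := hxle z (htsub.mem (by rw [hh]; simp))
          exact hzx (le_antisymm hzlex hxlez)
    have hcx : (x :: xs).count x = r.length + 1 := by
      rw [List.count_cons_self, ← hsplit, List.count_append]
      have h1 : r.count x = r.length := List.count_eq_length.2 (fun b hb => (hrx b hb).symm)
      have h2 : t.count x = 0 := List.count_eq_zero.2 hxt
      omega
    have hck : ∀ k : String, k ≠ x → (x :: xs).count k = t.count k := by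
      intro k hk
      rw [← hsplit]
      have hr0 : r.count k = 0 := List.count_eq_zero.2 (fun hk' => hk (hrx k hk'))
      simp only [List.count_cons, List.count_append, hr0]
      have : (x == k) = false := by simpa using fun h => hk h.symm
      simp [this]
    have hmem : ∀ k : String, k ∈ x :: xs ↔ (k = x ∨ k ∈ t) := by
      intro k
      constructor
      · intro hk
        rcases List.mem_cons.1 hk with rfl | hk
        · exact Or.inl rfl
        · rw [← hsplit] at hk
          rcases List.mem_append.1 hk with h1 | h1
          · exact Or.inl (hrx k h1)
          · exact Or.inr h1
      · intro hk
        rcases hk with rfl | hk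
        · exact List.mem_cons_self
        · exact List.mem_cons_of_mem _ (htsub.mem hk)
    have hunf : pvGroup (x :: xs) =
        (x, ((xs.takeWhile (fun y => y == x)).length : Int) + 1) ::
          pvGroup (xs.dropWhile (fun y => y == x)) := by
      rw [pvGroup]
    rcases ih htpw with ⟨ih1, ih2, ih3⟩
    refine ⟨?_, ?_, ?_⟩
    · rw [hunf]
      simp only [List.map_cons]
      refine List.pairwise_cons.2 ⟨?_, ih1⟩
      intro k hk
      have hkt : k ∈ t := (ih2 k).1 hk
      have hne : k ≠ x := fun h => hxt (h ▸ hkt)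
      exact lt_of_le_of_ne (hxle k (htsub.mem hkt)) (Ne.symm hne)
    · intro k
      rw [hunf]
      simp only [List.map_cons, List.mem_cons]
      rw [ih2 k]
      have := hmem k
      simp only [List.mem_cons] at this
      rw [← this]
    · intro p hp
      rw [hunf] at hp
      rcases List.mem_cons.1 hp with rfl | hp
      · show ((xs.takeWhile (fun y => y == x)).length : Int) + 1 = ((x :: xs).count x : Int)
        rw [hcx]
        push_cast
        ring
      · have h2 := ih3 p hp
        have hp1t : p.1 ∈ t := (ih2 p.1).1 (List.mem_map.2 ⟨p, hp, rfl⟩)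
        have hne : p.1 ≠ x := fun h => hxt (h ▸ hp1t)
        rw [h2, hck p.1 hne]

-- the boolean lexicographic comparison sorted2 uses on (lower name, name) pairs
def pvLt (p q : String × String) : Bool :=
  decide (p.1 < q.1) || (!decide (q.1 < p.1) && decide (p.2 < q.2))

theorem pvLt_iff (a b : String × String) :
    pvLt a b = true ↔ (a.1 < b.1 ∨ (¬ b.1 < a.1 ∧ a.2 < b.2)) := by
  simp [pvLt]

theorem pvLt_asym : ∀ a b, pvLt a b = true → pvLt b a = false := by
  intro a b h
  rw [Bool.eq_false_iff]
  intro h'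
  rw [pvLt_iff] at h h'
  rcases h with h1 | ⟨h1, h2⟩ <;> rcases h' with h3 | ⟨h3, h4⟩
  · exact lt_asymm h1 h3
  · exact h3 h1
  · exact h1 h3
  · exact lt_asymm h2 h4

theorem pvLt_trans : ∀ a b c, pvLt a b = true → pvLt b c = true → pvLt a c = true := by
  intro a b c h h'
  rw [pvLt_iff] at h h' ⊢
  rcases h with h1 | ⟨h1, h2⟩ <;> rcases h' with h3 | ⟨h3, h4⟩
  · exact Or.inl (lt_trans h1 h3)
  · exact Or.inl (lt_of_lt_of_le h1 (not_lt.1 h3))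
  · exact Or.inl (lt_of_le_of_lt (not_lt.1 h1) h3)
  · exact Or.inr ⟨fun hc => h1 (lt_of_le_of_lt (not_lt.1 h3) hc), lt_trans h2 h4⟩

theorem pvLt_antisymm (a b : String × String)
    (h : pvLt a b = false) (h' : pvLt b a = false) : a = b := by
  rw [Bool.eq_false_iff] at h h'
  have h₁ : ¬ (a.1 < b.1 ∨ (¬ b.1 < a.1 ∧ a.2 < b.2)) := fun hh => h ((pvLt_iff a b).2 hh)
  have h₂ : ¬ (b.1 < a.1 ∨ (¬ a.1 < b.1 ∧ b.2 < a.2)) := fun hh => h' ((pvLt_iff b a).2 hh)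
  push Not at h₁ h₂
  have e1 : a.1 = b.1 := le_antisymm (not_lt.1 h₂.1) (not_lt.1 h₁.1)
  have e2 : a.2 = b.2 := le_antisymm (not_lt.1 (h₂.2 h₁.1)) (not_lt.1 (h₁.2 h₂.1))
  exact Prod.ext e1 e2

theorem pv_main_false (l : List String)
    (hinj : ∀ x ∈ l, ∀ y ∈ l, x ≠ "NA" → y ≠ "NA" →
      PySem.Str.lower x = PySem.Str.lower y → x = y) :
    get_sorted_nr_data l false = get_sorted_nr_data_alt l false := by
  unfold get_sorted_nr_data get_sorted_nr_data_alt
  simp only [Bool.false_eq_true, if_false]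
  set F := l.filter (fun name => name != "NA") with hF
  set g : String → String × String := fun name => (PySem.Str.lower name, name) with hg
  have hginj : Function.Injective g := fun a b h => congrArg Prod.snd h
  have h1 : PySem.Set.ofList (F.map g) = (PySem.Set.ofList F).map g :=
    pv_ofList_map_inj g hginj F
  set F' : List String := PySem.Set.ofList F with hF'
  set D' := PySem.List.sorted F' (fun x => PySem.Str.lower x) with hD'
  have hFmem : ∀ n ∈ F, n ∈ l ∧ n ≠ "NA" := by
    intro n hn
    rcases List.mem_filter.1 hn with ⟨h2, h3⟩
    exact ⟨h2, by simpa using h3⟩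
  have hinj' : ∀ a ∈ F', ∀ b ∈ F', PySem.Str.lower a = PySem.Str.lower b → a = b := by
    intro a ha b hb hab
    rcases hFmem a ((PySem.Set.mem_ofList F a).1 ha) with ⟨ha1, ha2⟩
    rcases hFmem b ((PySem.Set.mem_ofList F b).1 hb) with ⟨hb1, hb2⟩
    exact hinj a ha1 b hb1 ha2 hb2 hab
  have hD'nodup : D'.Nodup := by
    have hp := PySem.List.sorted_perm F' (fun x => PySem.Str.lower x) false
    exact hp.nodup_iff.2 (PySem.Set.nodup_ofList F)
  have hD'memF' : ∀ a ∈ D', a ∈ F' := by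
    intro a ha
    exact (PySem.List.mem_sorted F' _ false a).1 ha
  have hD'strict : D'.Pairwise (fun a b => PySem.Str.lower a < PySem.Str.lower b) := by
    have hpw : D'.Pairwise (fun a b => PySem.Str.lower a ≤ PySem.Str.lower b) :=
      PySem.List.sorted_pairwise F' _
    have := hpw.and hD'nodup
    refine this.imp_of_mem ?_
    intro a b ha hb hab
    exact lt_of_le_of_ne hab.1
      (fun he => hab.2 (hinj' a (hD'memF' a ha) b (hD'memF' b hb) he))
  have hys2pw : (D'.map g).Pairwise (fun p q => pvLt q p = false) := by
    rw [List.pairwise_map]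
    refine hD'strict.imp ?_
    intro a b hab
    rw [Bool.eq_false_iff]
    intro hlt
    rw [pvLt_iff] at hlt
    rcases hlt with h2 | ⟨h2, _⟩
    · exact lt_asymm hab h2
    · exact h2 hab
  have hsorted2pw : (PySem.List.sorted2 (F'.map g)
      (fun p => p.1) (fun p => p.2)).Pairwise (fun p q => pvLt q p = false) := by
    show (List.foldl (fun acc x => PySem.List.insertBy _ x acc) [] _).Pairwise _
    exact pv_foldl_insertBy_pairwise pvLt pvLt_asym pvLt_trans _ [] List.Pairwise.nil
  have hperm : (PySem.List.sorted2 (F'.map g)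
      (fun p => p.1) (fun p => p.2)).Perm (D'.map g) := by
    have h2 := PySem.List.sorted2_perm (F'.map g)
      (fun p : String × String => p.1) (fun p => p.2) false
    have h3 : (D'.map g).Perm (F'.map g) :=
      (PySem.List.sorted_perm F' _ false).map g
    exact h2.trans h3.symm
  have heq : PySem.List.sorted2 (F'.map g)
      (fun p => p.1) (fun p => p.2) = D'.map g := by
    refine List.Perm.eq_of_pairwise ?_ hsorted2pw hys2pw hperm
    intro a b _ _ hab hba
    exact pvLt_antisymm a b hba hab
  rw [h1, heq]
  congr 1
  rw [List.map_map]
  have : (Prod.snd ∘ g) = fun n => n := rfl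
  rw [this, List.map_id']

theorem pv_main_true (l : List String) :
    get_sorted_nr_data l true = get_sorted_nr_data_alt l true := by
  unfold get_sorted_nr_data get_sorted_nr_data_alt
  simp only [if_true]
  set lcl := l.map (fun name => PySem.Str.lower name) with hlcl
  set S : List String := PySem.Set.ofList lcl with hS
  have hSnodup : S.Nodup := PySem.Set.nodup_ofList lcl
  set d := S.foldl (fun d name => d.insert name ((lcl.count name : Int)))
    (PySem.Dict.empty : PySem.Dict String Int) with hd
  have hempty : ∀ k ∈ S, (PySem.Dict.empty : PySem.Dict String Int).contains k = false := by
    intro k _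
    simp [PySem.Dict.contains, PySem.Dict.empty]
  have hitems : d.items = S.map (fun k => (k, (lcl.count k : Int))) := by
    have := pv_items_foldl_insert (f := fun k => (lcl.count k : Int)) S PySem.Dict.empty
      hSnodup hempty
    simpa [PySem.Dict.empty] using this
  have hcontains : ∀ k, d.contains k = true ↔ k ∈ S := by
    intro k
    simp [PySem.Dict.contains, hitems, List.any_map, Function.comp, List.any_eq_true]
  have hsize : d.size = S.length := by
    simp [PySem.Dict.size, hitems]
  have hgetD : ∀ k ∈ S, d.getD k 0 = (lcl.count k : Int) := by
    intro k hk
    simp [PySem.Dict.getD, PySem.Dict.get?, hitems,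
      pv_find?_map_pair (fun k => ((lcl.count k : Int))) S k hk]
  set ysB := PySem.List.sorted lcl (fun x => x) with hysB
  have hysBpw : ysB.Pairwise (· ≤ ·) := by
    simpa using PySem.List.sorted_pairwise lcl (fun x => x)
  obtain ⟨h1, h2, h3⟩ := pv_pvGroup_spec ysB hysBpw
  set G := pvGroup ysB with hG
  have hcnt : ∀ k, ysB.count k = lcl.count k :=
    fun k => (PySem.List.sorted_perm lcl (fun x => x) false).count_eq k
  have hKeysNodup : (G.map Prod.fst).Nodup := h1.imp (fun h => ne_of_lt h)
  have hmemKS : ∀ k, k ∈ G.map Prod.fst ↔ k ∈ S := by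
    intro k
    rw [h2 k, hS, PySem.Set.mem_ofList]
    exact PySem.List.mem_sorted lcl (fun x => x) false k
  have hperm : (G.map Prod.fst).Perm S :=
    (List.perm_ext_iff_of_nodup hKeysNodup hSnodup).2 hmemKS
  have hlen : G.length = S.length := by
    rw [← hperm.length_eq, List.length_map]
  have hcondiff : (d.contains "na" = true ∧ d.size = 1) ↔
      (G.length = 1 ∧ (G.headD ("", 0)).1 = "na") := by
    constructor
    · rintro ⟨hna, hs1⟩
      have hS1 : S.length = 1 := by rw [hsize] at hs1; exact hs1
      have hG1 : G.length = 1 := by rw [hlen, hS1]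
      rcases List.length_eq_one_iff.1 hG1 with ⟨p, hp⟩
      have hkeys1 : G.map Prod.fst = [p.1] := by rw [hp]; rfl
      have hSp : S = [p.1] := List.perm_singleton.1 (by rw [← hkeys1]; exact hperm.symm)
      have hna' : "na" ∈ S := (hcontains "na").1 hna
      rw [hSp] at hna'
      have hpna : p.1 = "na" := by
        have h9 : "na" = p.1 := by simpa using hna'
        exact h9.symm
      exact ⟨hG1, by rw [hp]; simpa using hpna⟩
    · rintro ⟨hG1, hhd⟩
      rcases List.length_eq_one_iff.1 hG1 with ⟨p, hp⟩
      have hkeys1 : G.map Prod.fst = [p.1] := by rw [hp]; rfl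
      have hSp : S = [p.1] := List.perm_singleton.1 (by rw [← hkeys1]; exact hperm.symm)
      have hpna : p.1 = "na" := by rw [hp] at hhd; simpa using hhd
      refine ⟨(hcontains "na").2 (by rw [hSp, hpna]; simp), ?_⟩
      rw [hsize, hSp]; rfl
  have hcondbool : (d.contains "na" && d.size == 1) =
      (G.length == 1 && ((G.headD ("", 0)).1 == "na")) := by
    rw [Bool.eq_iff_iff]
    simp only [Bool.and_eq_true, beq_iff_eq]
    exact hcondiff
  by_cases hc : (d.contains "na" && d.size == 1) = true
  · rw [if_pos hc, if_pos (hcondbool ▸ hc)]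
    show PySem.Str.join " / " ["NA"] = "NA"
    simp [PySem.Str.join, PySem.Chars.join_singleton]
  · have hcB : ¬ (G.length == 1 && ((G.headD ("", 0)).1 == "na")) = true := by
      rw [← hcondbool]; exact hc
    rw [if_neg hc]
    rw [if_neg hcB]
    have hitems2 : (if d.contains "na" then d.erase "na" else d).items =
        (S.filter (fun k => !(k == "na"))).map (fun k => (k, (lcl.count k : Int))) := by
      by_cases hna : d.contains "na" = true
      · rw [if_pos hna]
        show d.items.filter (fun p => !(p.1 == "na")) = _
        rw [hitems, List.filter_map]
        rfl
      · rw [if_neg hna]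
        rw [hitems]
        congr 1
        symm
        apply List.filter_eq_self.2
        intro k hk
        have : k ≠ "na" := by
          intro he
          exact hna ((hcontains "na").2 (he ▸ hk))
        simpa using this
    have hkeys2 : (if d.contains "na" then d.erase "na" else d).keys =
        S.filter (fun k => !(k == "na")) := by
      rw [PySem.Dict.keys, hitems2, List.map_map]
      exact List.map_id' _
    have hgetD2 : ∀ k ∈ S.filter (fun k => !(k == "na")),
        (if d.contains "na" then d.erase "na" else d).getD k 0 = (lcl.count k : Int) := by
      intro k hk
      simp [PySem.Dict.getD, PySem.Dict.get?, hitems2,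
        pv_find?_map_pair (fun k => ((lcl.count k : Int))) _ k hk]
    have hKBperm : ((G.map Prod.fst).filter (fun k => !(k == "na"))).Perm
        (S.filter (fun k => !(k == "na"))) := hperm.filter _
    have hKBlt : ((G.map Prod.fst).filter (fun k => !(k == "na"))).Pairwise (· < ·) :=
      h1.sublist List.filter_sublist
    have hlower_fix : ∀ k ∈ G.map Prod.fst, PySem.Str.lower k = k := by
      intro k hk
      have hkl : k ∈ lcl := by
        rw [hmemKS k, hS, PySem.Set.mem_ofList] at hk
        exact hk
      rcases List.mem_map.1 hkl with ⟨n, _, rfl⟩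
      exact pv_lower_idem n
    have hKBpw : ((G.map Prod.fst).filter (fun k => !(k == "na"))).Pairwise
        (fun a b => PySem.Str.lower a < PySem.Str.lower b) := by
      refine hKBlt.imp_of_mem ?_
      intro a b ha hb hab
      rw [hlower_fix a (List.mem_of_mem_filter ha), hlower_fix b (List.mem_of_mem_filter hb)]
      exact hab
    have hsortedA : PySem.List.sorted (S.filter (fun k => !(k == "na")))
        (fun x => PySem.Str.lower x) = (G.map Prod.fst).filter (fun k => !(k == "na")) :=
      PySem.List.sorted_eq_of_perm_of_pairwise_lt _ _ _ hKBperm hKBpw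
    rw [hkeys2, hsortedA]
    congr 1
    rw [List.filter_map, List.map_map]
    have hpred : (fun g : String × Int => g.1 != "na") =
        ((fun k : String => !(k == "na")) ∘ Prod.fst) := rfl
    rw [← hpred]
    apply List.map_congr_left
    intro p hp
    have hpG : p ∈ G := List.mem_of_mem_filter hp
    have hpKeys : p.1 ∈ G.map Prod.fst := List.mem_map.2 ⟨p, hpG, rfl⟩
    have hpSna : p.1 ∈ S.filter (fun k => !(k == "na")) := by
      refine List.mem_filter.2 ⟨(hmemKS p.1).1 hpKeys, ?_⟩
      exact (List.mem_filter.1 hp).2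
    have hv : p.2 = (lcl.count p.1 : Int) := by
      rw [h3 p hpG, hcnt]
    show p.1 ++ " [" ++ PySem.Int.toStr ((if d.contains "na" then d.erase "na" else d).getD p.1 0) ++ "]"
        = p.1 ++ " [" ++ PySem.Int.toStr p.2 ++ "]"
    rw [hgetD2 p.1 hpSna, hv]

theorem pv_main : ∀ (specific_list : List String) (counter : Bool),
    Pre_get_sorted_nr_data specific_list counter →
    get_sorted_nr_data specific_list counter = get_sorted_nr_data_alt specific_list counter := by
  intro l c hpre
  cases c with
  | false =>
    rcases hpre with h | h
    · exact absurd h (by simp)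
    · exact pv_main_false l h
  | true => exact pv_main_true l

-- ===== VERDICT (by name: the statement is the Claim_ definition above) =====
theorem get_sorted_nr_data_spec : Claim_equal_get_sorted_nr_data := by
  intro specific_list counter _ hpre
  unfold Spec_get_sorted_nr_data
  exact pv_main specific_list counter hpre
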